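-- pv_equiv track=rewrite | github.com/simsekhalit/CookSheets-Algorithms | problems/hackerrank-min-max-riddle/solution.py | findRightSpans
-- ===== SOURCE A (Python) =====
-- def findRightSpans(arr):
--     spans = [0] * len(arr)
--     spans[-1] = 1
--
--     for i in range(len(arr) - 2, -1, -1):
--         span = 1
--
--         while i + span < len(arr) and arr[i + span] >= arr[i]:
--             span += spans[i + span]
--
--         spans[i] = span
--
--     return spans
-- ===== SOURCE B (Python) =====
-- def findRightSpans(arr):
--     spans = []
--     stack = []
--     for i in range(len(arr) - 1, -1, -1):
--         while stack and arr[stack[-1]] >= arr[i]: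
--             stack.pop()
--         spans.append(stack[-1] - i if stack else len(arr) - i)
--         stack.append(i)
--     spans.reverse()
--     return spans
-- ===== Notes on version B (the rewrite author's own statement) =====
-- stated objective: alternative
-- what changed: A fills the spans array right-to-left and, for each index, jumps through the partially built spans array (span += spans[i+span]) to skip over greater-or-equal elements; B instead maintains a monotonic stack of next-smaller candidate indices, popping while the top is >= arr[i], so each span is read off the stack top.
-- crash fix: On the empty list A raises IndexError assigning the initial last-element span, while B's loop simply runs zero times and returns the empty list. — e.g. on findRightSpans([]): A raises IndexError, B returns []
import Mathlib
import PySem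

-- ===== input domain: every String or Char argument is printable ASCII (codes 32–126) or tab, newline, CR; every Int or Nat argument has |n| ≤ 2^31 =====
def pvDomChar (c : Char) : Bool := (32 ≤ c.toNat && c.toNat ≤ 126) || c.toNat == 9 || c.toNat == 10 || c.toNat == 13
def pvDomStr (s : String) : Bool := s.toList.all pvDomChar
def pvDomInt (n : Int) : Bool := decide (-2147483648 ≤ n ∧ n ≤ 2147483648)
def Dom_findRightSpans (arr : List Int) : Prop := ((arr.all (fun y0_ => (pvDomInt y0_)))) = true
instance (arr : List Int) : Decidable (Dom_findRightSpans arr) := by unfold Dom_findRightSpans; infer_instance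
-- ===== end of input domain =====

-- B replaces A's span-jumping (hopping through the partially built spans array) by a
-- monotonic stack of next-smaller candidates; objective: alternative algorithm, same results.

-- ===== PORT A =====
-- Python's inner `while` loop, with fuel = len(arr); on inputs admitted by Pre_ each
-- iteration strictly advances i + span (spans entries to the right are ≥ 1), so the fuel
-- is never exhausted. All indices read are in range, so List.getD matches Python indexing.
def whileA (arr spans : List Int) (i : Nat) : Nat → Nat → Nat
  | span, 0 => span
  | span, fuel+1 =>
    if i + span < arr.length ∧ arr.getD i 0 ≤ arr.getD (i + span) 0 then
      whileA arr spans i (span + (spans.getD (i + span) 0).toNat) fuel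
    else span

-- `for i in range(len(arr)-2, -1, -1)` : loopA _ _ (k+1) processes index k then recurses.
def loopA (arr : List Int) : List Int → Nat → List Int
  | spans, 0 => spans
  | spans, k+1 => loopA arr (spans.set k ((whileA arr spans k 1 arr.length : Nat) : Int)) k

def findRightSpans (arr : List Int) : List Int :=
  if arr.isEmpty then []  -- Python raises IndexError assigning the last span; excluded by Pre_
  else loopA arr ((List.replicate arr.length (0:Int)).set (arr.length - 1) 1) (arr.length - 1)

-- ===== PORT B =====
-- `while stack and arr[stack[-1]] >= arr[i]: stack.pop()`
def popWhile (arr : List Int) (x : Int) : List Nat → List Nat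
  | [] => []
  | j :: rest => if x ≤ arr.getD j 0 then popWhile arr x rest else j :: rest

-- the for-loop of Source B; `spans.append(...)` followed by the final `spans.reverse()` is
-- rendered as consing onto the accumulator while i counts down.
def loopB (arr : List Int) : Nat → List Nat → List Int → List Int
  | 0, _, acc => acc
  | k+1, stack, acc =>
    let st := popWhile arr (arr.getD k 0) stack
    let v : Int :=
      match st with
      | [] => (arr.length : Int) - (k : Int)
      | j :: _ => (j : Int) - (k : Int)
    loopB arr k (k :: st) (v :: acc)

def findRightSpans_alt (arr : List Int) : List Int := loopB arr arr.length [] []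

-- ===== PRECONDITION & SPEC =====
-- Pre_ excludes only the empty list, on which A raises IndexError assigning the last span.
def Pre_findRightSpans (arr : List Int) : Prop := arr ≠ []
instance (arr : List Int) : Decidable (Pre_findRightSpans arr) := by unfold Pre_findRightSpans; infer_instance
def pvWitness_findRightSpans : List Int := [3, 1, 2]

-- On the empty list A raises IndexError while B returns [].
def Raises_findRightSpans (arr : List Int) : Prop := arr = []
instance (arr : List Int) : Decidable (Raises_findRightSpans arr) := by unfold Raises_findRightSpans; infer_instance
def pvRaiseWitness_findRightSpans : List Int := []
def pvRaiseWitnessOut_findRightSpans : List Int := []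

def Spec_findRightSpans (arr : List Int) (out : List Int) : Prop := out = findRightSpans_alt arr
instance (arr : List Int) (out : List Int) : Decidable (Spec_findRightSpans arr out) := by unfold Spec_findRightSpans; infer_instance

-- ===== CLAIM (what is proved, stated in full; the proofs are below) =====
def Claim_equal_findRightSpans : Prop := ∀ (arr : List Int), Dom_findRightSpans arr → Pre_findRightSpans arr → Spec_findRightSpans arr (findRightSpans arr)
def Claim_raises_findRightSpans : Prop := (∀ (arr : List Int), Dom_findRightSpans arr → Raises_findRightSpans arr → ¬ Pre_findRightSpans arr) ∧ (Dom_findRightSpans (pvRaiseWitness_findRightSpans) ∧ Raises_findRightSpans (pvRaiseWitness_findRightSpans) ∧ findRightSpans_alt (pvRaiseWitness_findRightSpans) = pvRaiseWitnessOut_findRightSpans)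

-- ===== LEMMAS AND PROOFS =====

-- `cnt a l` = length of the maximal prefix of l whose elements are ≥ a.
def cnt (a : Int) : List Int → Nat
  | [] => 0
  | x :: xs => if a ≤ x then cnt a xs + 1 else 0

-- reference value: the right span of index i (1 + number of following elements ≥ arr[i]
-- before the first strictly smaller one).
def refSpan (arr : List Int) (i : Nat) : Nat :=
  1 + cnt (arr.getD i 0) (arr.drop (i+1))

lemma cnt_le_length (a : Int) (l : List Int) : cnt a l ≤ l.length := by
  induction l with
  | nil => simp [cnt]
  | cons x xs ih => by_cases h : a ≤ x <;> simp only [cnt, h, if_true, if_false, List.length_cons] <;> omega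

lemma cnt_mid (a : Int) (l : List Int) : ∀ m, m < cnt a l → a ≤ l.getD m 0 := by
  induction l with
  | nil => simp [cnt]
  | cons x xs ih =>
    intro m hm
    by_cases h : a ≤ x
    · cases m with
      | zero => simpa using h
      | succ m' =>
        simp only [cnt, h, if_true] at hm
        simpa using ih m' (by omega)
    · simp [cnt, h] at hm

lemma cnt_stop (a : Int) (l : List Int) (h : cnt a l < l.length) : l.getD (cnt a l) 0 < a := by
  induction l with
  | nil => simp [cnt] at h
  | cons x xs ih =>
    by_cases hx : a ≤ x
    · simp only [cnt, hx, if_true, List.length_cons] at h ⊢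
      simpa using ih (by omega)
    · simp only [cnt, hx, if_false] at h ⊢
      simp only [List.getD_cons_zero]
      omega

lemma getD_drop' (arr : List Int) (s m : Nat) :
    (arr.drop s).getD m 0 = arr.getD (s + m) 0 := by
  rw [List.getD_eq_getElem?_getD, List.getD_eq_getElem?_getD, List.getElem?_drop]

lemma refSpan_pos (arr : List Int) (i : Nat) : 1 ≤ refSpan arr i := by
  simp only [refSpan]; omega

lemma refSpan_le (arr : List Int) (i : Nat) (hi : i < arr.length) :
    i + refSpan arr i ≤ arr.length := by
  have h := cnt_le_length (arr.getD i 0) (arr.drop (i+1))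
  rw [List.length_drop] at h
  simp only [refSpan]; omega

lemma refSpan_mid (arr : List Int) (i k : Nat) (hi : i < arr.length)
    (h1 : i < k) (h2 : k < i + refSpan arr i) : arr.getD i 0 ≤ arr.getD k 0 := by
  have hm : k - (i+1) < cnt (arr.getD i 0) (arr.drop (i+1)) := by
    simp only [refSpan] at h2; omega
  have h := cnt_mid (arr.getD i 0) (arr.drop (i+1)) _ hm
  rwa [getD_drop' arr (i+1) (k - (i+1)), show i+1+(k-(i+1)) = k by omega] at h

lemma refSpan_stop (arr : List Int) (i : Nat) (hi : i < arr.length)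
    (h : i + refSpan arr i < arr.length) :
    arr.getD (i + refSpan arr i) 0 < arr.getD i 0 := by
  have hc : cnt (arr.getD i 0) (arr.drop (i+1)) < (arr.drop (i+1)).length := by
    rw [List.length_drop]
    simp only [refSpan] at h; omega
  have hs := cnt_stop (arr.getD i 0) (arr.drop (i+1)) hc
  rwa [getD_drop' arr (i+1) _,
    show i+1+cnt (arr.getD i 0) (arr.drop (i+1)) = i + refSpan arr i by simp only [refSpan]; omega] at hs

lemma refSpan_jump (arr : List Int) (i j : Nat) (hi : i < arr.length)
    (h1 : i < j) (h2 : j < i + refSpan arr i) : j + refSpan arr j ≤ i + refSpan arr i := by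
  have hle := refSpan_le arr i hi
  have hj : j < arr.length := by omega
  by_contra hc
  push_neg at hc
  rcases Nat.lt_or_ge (i + refSpan arr i) arr.length with hlt | hge
  · have hs := refSpan_stop arr i hi hlt
    have h3 := refSpan_mid arr j (i + refSpan arr i) hj (by omega) (by omega)
    have h4 := refSpan_mid arr i j hi h1 h2
    omega
  · have := refSpan_le arr j hj
    omega

lemma whileA_correct (arr spans : List Int) (i : Nat) (hi : i < arr.length)
    (hsp : ∀ j, i < j → j < arr.length → spans.getD j 0 = (refSpan arr j : Int)) :
    ∀ fuel s, 1 ≤ s → s ≤ refSpan arr i → refSpan arr i ≤ s + fuel →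
      whileA arr spans i s fuel = refSpan arr i := by
  intro fuel
  induction fuel with
  | zero => intro s h1 h2 h3; simp only [whileA]; omega
  | succ fuel ih =>
    intro s h1 h2 h3
    rcases Nat.lt_or_ge s (refSpan arr i) with hlt | hge
    · have hsn : i + s < arr.length := by have := refSpan_le arr i hi; omega
      have hch : arr.getD i 0 ≤ arr.getD (i + s) 0 :=
        refSpan_mid arr i (i + s) hi (by omega) (by omega)
      rw [whileA, if_pos ⟨hsn, hch⟩, hsp (i + s) (by omega) hsn, Int.toNat_natCast]
      have hjump := refSpan_jump arr i (i + s) hi (by omega) (by omega)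
      have hpos := refSpan_pos arr (i + s)
      exact ih (s + refSpan arr (i + s)) (by omega) (by omega) (by omega)
    · have hs : s = refSpan arr i := by omega
      subst hs
      rw [whileA, if_neg]
      rintro ⟨hlt, hch⟩
      have := refSpan_stop arr i hi hlt
      omega

lemma loopA_length (arr : List Int) : ∀ k spans, (loopA arr spans k).length = spans.length := by
  intro k
  induction k with
  | zero => intro spans; rfl
  | succ k ih => intro spans; rw [loopA, ih, List.length_set]

lemma loopA_getD (arr : List Int) :
    ∀ k spans, spans.length = arr.length → k ≤ arr.length →
      (∀ j, k ≤ j → j < arr.length → spans.getD j 0 = (refSpan arr j : Int)) →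
      ∀ j, j < arr.length → (loopA arr spans k).getD j 0 = (refSpan arr j : Int) := by
  intro k
  induction k with
  | zero => intro spans hlen _ hsp j hj; exact hsp j (Nat.zero_le _) hj
  | succ k ih =>
    intro spans hlen hk hsp j hj
    have hkn : k < arr.length := by omega
    have hw : whileA arr spans k 1 arr.length = refSpan arr k := by
      apply whileA_correct arr spans k hkn (fun j h1 h2 => hsp j (Nat.succ_le_of_lt h1) h2)
      · exact le_rfl
      · exact refSpan_pos arr k
      · have := refSpan_le arr k hkn; omega
    rw [loopA]
    apply ih _ (by rw [List.length_set]; exact hlen) (by omega) _ j hj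
    intro j' h1 h2
    rcases Nat.eq_or_lt_of_le h1 with he | hlt
    · subst he
      rw [List.getD_eq_getElem?_getD, List.getElem?_set_self (by omega), hw]
      rfl
    · rw [List.getD_eq_getElem?_getD, List.getElem?_set_ne (by omega),
        ← List.getD_eq_getElem?_getD]
      exact hsp j' (by omega) h2

lemma findRightSpans_eq_ref (arr : List Int) (h : arr ≠ []) :
    findRightSpans arr = (List.range arr.length).map (fun j => (refSpan arr j : Int)) := by
  have hn : 0 < arr.length := List.length_pos_iff.mpr h
  rw [findRightSpans, if_neg (by simpa [List.isEmpty_iff])]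
  have hlen0 : ((List.replicate arr.length (0:Int)).set (arr.length - 1) 1).length = arr.length := by
    simp
  apply List.ext_getElem
  · rw [loopA_length, hlen0]; simp
  · intro j hj hj2
    have hja : j < arr.length := by rwa [loopA_length, hlen0] at hj
    have hg := loopA_getD arr (arr.length - 1) _ hlen0 (by omega) ?_ j hja
    · rw [List.getD_eq_getElem?_getD, List.getElem?_eq_getElem hj] at hg
      simp only [Option.getD_some] at hg
      simp [hg]
    · intro j' h1 h2
      have hj' : j' = arr.length - 1 := by omega
      subst hj'
      rw [List.getD_eq_getElem?_getD, List.getElem?_set_self (by simp; omega)]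
      have hr : refSpan arr (arr.length - 1) = 1 := by
        have hd : arr.drop (arr.length - 1 + 1) = [] := List.drop_eq_nil_of_le (by omega)
        simp [refSpan, hd, cnt]
      simp [hr]

-- stack characterisation: after processing index k, the stack is exactly the list of
-- indices j ≥ k such that arr[j] is strictly smaller than every arr[m], k ≤ m < j.
def keepB (arr : List Int) (i j : Nat) : Bool :=
  (List.range' i (j - i)).all fun k => decide (arr.getD j 0 < arr.getD k 0)

lemma keepB_iff (arr : List Int) (i j : Nat) :
    keepB arr i j = true ↔ ∀ k, i ≤ k → k < j → arr.getD j 0 < arr.getD k 0 := by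
  simp only [keepB, List.all_eq_true, List.mem_range'_1, decide_eq_true_iff]
  constructor
  · intro h k h1 h2
    exact h k ⟨h1, by omega⟩
  · rintro h k ⟨h1, h2⟩
    exact h k h1 (by omega)

lemma keepB_succ (arr : List Int) (i j : Nat) (h : i < j) :
    keepB arr i j = (keepB arr (i+1) j && decide (arr.getD j 0 < arr.getD i 0)) := by
  rw [Bool.eq_iff_iff]
  rw [Bool.and_eq_true]
  simp only [decide_eq_true_iff, keepB_iff]
  constructor
  · intro hh
    exact ⟨fun k h1 h2 => hh k (by omega) h2, hh i le_rfl h⟩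
  · rintro ⟨h1, h2⟩ k hk1 hk2
    rcases Nat.eq_or_lt_of_le hk1 with he | hlt
    · subst he; exact h2
    · exact h1 k hlt hk2

lemma popWhile_eq_filter (arr : List Int) (x : Int) :
    ∀ st : List Nat, st.Pairwise (fun j1 j2 => arr.getD j2 0 < arr.getD j1 0) →
      popWhile arr x st = st.filter (fun j => decide (arr.getD j 0 < x)) := by
  intro st
  induction st with
  | nil => intro _; rfl
  | cons j rest ih =>
    intro hp
    rw [List.pairwise_cons] at hp
    obtain ⟨hall, hrest⟩ := hp
    by_cases hx : x ≤ arr.getD j 0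
    · rw [popWhile, if_pos hx, ih hrest, List.filter_cons,
        if_neg (by simp only [decide_eq_true_iff]; omega)]
    · rw [popWhile, if_neg hx, List.filter_cons]
      push_neg at hx
      simp only [hx, decide_true, if_true]
      congr 1
      symm
      rw [List.filter_eq_self]
      intro a ha
      simp only [decide_eq_true_iff]
      have := hall a ha
      omega

lemma filter_keepB_pairwise (arr : List Int) (i s m : Nat) (his : i ≤ s) :
    ((List.range' s m).filter (keepB arr i)).Pairwise (fun j1 j2 => arr.getD j2 0 < arr.getD j1 0) := by
  have h1 : ((List.range' s m).filter (keepB arr i)).Pairwise (· < ·) :=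
    (List.pairwise_lt_range' 1).sublist (List.filter_sublist)
  apply List.Pairwise.imp_of_mem _ h1
  intro a b ha hb hab
  have hb' := (List.mem_filter.mp hb).2
  have ha' := (List.mem_filter.mp ha).1
  rw [keepB_iff] at hb'
  exact hb' a (by have := (List.mem_range'_1.mp ha').1; omega) hab

lemma stack_step (arr : List Int) (k : Nat) (hk : k < arr.length) :
    popWhile arr (arr.getD k 0)
        ((List.range' (k+1) (arr.length - (k+1))).filter (keepB arr (k+1)))
      = (List.range' (k+1) (arr.length - (k+1))).filter (keepB arr k) := by
  rw [popWhile_eq_filter arr _ _ (filter_keepB_pairwise arr (k+1) (k+1) _ le_rfl), List.filter_filter]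
  apply List.filter_congr
  intro j hj
  rcases List.mem_range'_1.mp hj with ⟨h1, _⟩
  rw [keepB_succ arr k j (by omega), Bool.and_comm]

lemma value_nil (arr : List Int) (k : Nat) (hk : k < arr.length)
    (h : (List.range' (k+1) (arr.length - (k+1))).filter (keepB arr k) = []) :
    refSpan arr k = arr.length - k := by
  have hle := refSpan_le arr k hk
  by_contra hc
  have hlt : k + refSpan arr k < arr.length := by omega
  have hstop := refSpan_stop arr k hk hlt
  have hkeep : keepB arr k (k + refSpan arr k) = true := by
    rw [keepB_iff]
    intro m h1 h2
    rcases Nat.eq_or_lt_of_le h1 with he | hlt2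
    · subst he; exact hstop
    · have := refSpan_mid arr k m hk hlt2 h2
      omega
  have hmem : k + refSpan arr k ∈ (List.range' (k+1) (arr.length - (k+1))).filter (keepB arr k) := by
    rw [List.mem_filter]
    exact ⟨List.mem_range'_1.mpr ⟨by have := refSpan_pos arr k; omega, by omega⟩, hkeep⟩
  rw [h] at hmem
  cases hmem

lemma value_cons (arr : List Int) (k j0 : Nat) (rest : List Nat) (hk : k < arr.length)
    (h : (List.range' (k+1) (arr.length - (k+1))).filter (keepB arr k) = j0 :: rest) :
    j0 = k + refSpan arr k := by
  have hmem : j0 ∈ (List.range' (k+1) (arr.length - (k+1))).filter (keepB arr k) := by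
    rw [h]; exact List.mem_cons_self
  rw [List.mem_filter] at hmem
  obtain ⟨hr, hkeep⟩ := hmem
  rcases List.mem_range'_1.mp hr with ⟨h1, h2⟩
  rw [keepB_iff] at hkeep
  have hj0lt : arr.getD j0 0 < arr.getD k 0 := hkeep k le_rfl (by omega)
  have hle := refSpan_le arr k hk
  have hlt : k + refSpan arr k < arr.length := by
    rcases Nat.lt_or_ge (k + refSpan arr k) arr.length with hlt | hge
    · exact hlt
    · have := refSpan_mid arr k j0 hk (by omega) (by omega)
      omega
  have hstop := refSpan_stop arr k hk hlt
  have hkeep1 : keepB arr k (k + refSpan arr k) = true := by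
    rw [keepB_iff]
    intro m hm1 hm2
    rcases Nat.eq_or_lt_of_le hm1 with he | hlt2
    · subst he; exact hstop
    · have := refSpan_mid arr k m hk hlt2 hm2
      omega
  have hmem1 : k + refSpan arr k ∈ (List.range' (k+1) (arr.length - (k+1))).filter (keepB arr k) := by
    rw [List.mem_filter]
    exact ⟨List.mem_range'_1.mpr ⟨by have := refSpan_pos arr k; omega, by omega⟩, hkeep1⟩
  rw [h, List.mem_cons] at hmem1
  have hsorted : (j0 :: rest).Pairwise (· < ·) := by
    rw [← h]
    exact (List.pairwise_lt_range' 1).sublist (List.filter_sublist)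
  have hj0le : j0 ≤ k + refSpan arr k := by
    rcases hmem1 with he | hm
    · omega
    · have := (List.pairwise_cons.mp hsorted).1 _ hm
      omega
  have hj1le : k + refSpan arr k ≤ j0 := by
    by_contra hc
    push_neg at hc
    have := refSpan_mid arr k j0 hk (by omega) (by omega)
    omega
  omega

lemma loopB_spec (arr : List Int) :
    ∀ k (acc : List Int), k ≤ arr.length →
      loopB arr k ((List.range' k (arr.length - k)).filter (keepB arr k)) acc
        = ((List.range k).map (fun j => (refSpan arr j : Int))) ++ acc := by
  intro k
  induction k with
  | zero => intro acc _; simp [loopB]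
  | succ k ih =>
    intro acc hk
    have hkn : k < arr.length := by omega
    have hkk : keepB arr k k = true := by simp [keepB]
    have hsplit : (List.range' k (arr.length - k)).filter (keepB arr k)
        = k :: (List.range' (k+1) (arr.length - (k+1))).filter (keepB arr k) := by
      have he : arr.length - k = (arr.length - (k+1)) + 1 := by omega
      rw [he, List.range'_succ, List.filter_cons, hkk]
      simp
    -- the incoming stack (invariant at k+1) gets popped down to the invariant at k
    rw [loopB]
    simp only [stack_step arr k hkn]
    cases hfil : (List.range' (k+1) (arr.length - (k+1))).filter (keepB arr k) with
    | nil =>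
      have hval := value_nil arr k hkn hfil
      have hveq : (arr.length : Int) - (k : Int) = (refSpan arr k : Int) := by
        have hle := refSpan_le arr k hkn; omega
      rw [show (k : Nat) :: ([] : List Nat)
          = (List.range' k (arr.length - k)).filter (keepB arr k) by rw [hsplit, hfil]]
      rw [ih _ (by omega)]
      simp [hveq, List.range_succ]
    | cons j0 rest =>
      have hval := value_cons arr k j0 rest hkn hfil
      have hveq : (j0 : Int) - (k : Int) = (refSpan arr k : Int) := by
        rw [hval]; push_cast; ring
      rw [show (k : Nat) :: (j0 :: rest)
          = (List.range' k (arr.length - k)).filter (keepB arr k) by rw [hsplit, hfil]]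
      rw [ih _ (by omega)]
      simp [hveq, List.range_succ]

lemma findRightSpans_alt_eq_ref (arr : List Int) :
    findRightSpans_alt arr = (List.range arr.length).map (fun j => (refSpan arr j : Int)) := by
  have h := loopB_spec arr arr.length [] le_rfl
  rw [show (List.range' arr.length (arr.length - arr.length)).filter (keepB arr arr.length)
      = ([] : List Nat) by simp] at h
  rw [findRightSpans_alt, h, List.append_nil]

-- ===== VERDICT (by name: the statement is the Claim_ definition above) =====
theorem findRightSpans_spec : Claim_equal_findRightSpans := by
  intro arr _ hpre
  unfold Spec_findRightSpans
  rw [findRightSpans_eq_ref arr hpre, findRightSpans_alt_eq_ref arr]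

@[simp] theorem findRightSpans_raises : Claim_raises_findRightSpans := by
  unfold Claim_raises_findRightSpans
  refine ⟨fun arr _ hr => ?_, by decide⟩
  simp only [Raises_findRightSpans] at hr
  simp [Pre_findRightSpans, hr]
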